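-- pv_equiv track=rewrite | github.com/CelkMehmett/Tusco-Ders-Notlar- | slm/dry_run.py | expand_dataset
-- ===== SOURCE A (Python) =====
-- def expand_dataset(unified, target_size=80):
--     # Repeat examples to reach target_size (simple augmentation for dry-run)
--     ins, outs = unified["instruction"], unified["response"]
--     cur = len(ins)
--     if cur == 0:
--         raise ValueError("No kid examples found")
--     while len(ins) < target_size:
--         ins.extend(ins[: min(cur, target_size - len(ins))])
--         outs.extend(outs[: min(cur, target_size - len(outs))])
--     return {"instruction": ins[:target_size], "response": outs[:target_size]}
-- ===== SOURCE B (Python) =====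
-- def expand_dataset(unified, target_size=80):
--     # Repeat examples cyclically to reach target_size (direct tiling, no chunk-doubling loop).
--     # Like A, mutates the input lists in place (extends them to target_size when needed).
--     ins, outs = unified["instruction"], unified["response"]
--     cur = len(ins)
--     if cur == 0:
--         raise ValueError("No kid examples found")
--     if target_size > cur:
--         ins.extend([ins[i % cur] for i in range(cur, target_size)])
--         outs.extend([outs[i % cur] for i in range(cur, target_size)])
--     return {"instruction": ins[:target_size], "response": outs[:target_size]}
-- ===== Notes on version B (the rewrite author's own statement) =====
-- stated objective: idiomatic
-- what changed: Replaces A's chunk-doubling while loop (repeatedly self-extending both lists by prefixes) with a single direct cyclic tiling: each list is extended once with element i%cur for i in range(cur, target_size).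
import Mathlib
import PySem

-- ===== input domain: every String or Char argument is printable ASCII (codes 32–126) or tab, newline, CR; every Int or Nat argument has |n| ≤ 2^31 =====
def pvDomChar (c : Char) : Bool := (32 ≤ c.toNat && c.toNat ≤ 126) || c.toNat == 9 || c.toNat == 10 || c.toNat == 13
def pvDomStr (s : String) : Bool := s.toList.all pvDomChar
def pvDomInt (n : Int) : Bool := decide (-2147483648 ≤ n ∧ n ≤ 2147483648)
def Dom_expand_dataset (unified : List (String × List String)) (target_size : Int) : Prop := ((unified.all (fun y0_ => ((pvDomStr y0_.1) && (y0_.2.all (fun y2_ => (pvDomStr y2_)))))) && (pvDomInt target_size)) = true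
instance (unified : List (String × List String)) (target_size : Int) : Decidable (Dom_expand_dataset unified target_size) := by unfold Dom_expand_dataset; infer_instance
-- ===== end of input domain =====

-- B replaces A's chunk-doubling while loop by one direct cyclic tiling (extend with x[i % cur]);
-- like A it mutates the input lists in place, and the equivalence proved is about the return value.


-- ===== PORT A =====
-- the while loop: 'while len(ins) < target: ins.extend(ins[:min(cur,target-len(ins))]); outs.extend(...)'
-- (the extra conjuncts '1 ≤ cur ∧ 0 < ins.length' only make the recursion total; at the call site
--  cur = len ins ≥ 1, so they are implied by Python's loop condition)
-- termination measure for the while loop (cited by name in decreasing_by)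
theorem expandLoop_measure_lt (cur target : Int) (ins : List String)
    (h : (ins.length : Int) < target ∧ 1 ≤ cur ∧ 0 < ins.length) :
    (target - ((ins ++ PySem.List.slice ins none (some (min cur (target - (ins.length : Int))))).length : Int)).toNat
      < (target - (ins.length : Int)).toNat := by
  rw [PySem.List.slice_to ins (by omega)]
  have h1 : 1 ≤ (ins.take (min cur (target - (ins.length : Int))).toNat).length := by
    simp only [List.length_take]
    omega
  simp only [List.length_append]
  omega

def expandLoop (cur target : Int) (ins outs : List String) : List String × List String :=
  if h : (ins.length : Int) < target ∧ 1 ≤ cur ∧ 0 < ins.length then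
    expandLoop cur target
      (ins ++ PySem.List.slice ins none (some (min cur (target - (ins.length : Int)))))
      (outs ++ PySem.List.slice outs none (some (min cur (target - (outs.length : Int)))))
  else (ins, outs)
termination_by (target - (ins.length : Int)).toNat
decreasing_by exact expandLoop_measure_lt cur target ins h

def expand_dataset (unified : List (String × List String)) (target_size : Int) : List (String × List String) :=
  match List.lookup "instruction" unified, List.lookup "response" unified with
  | some ins, some outs =>
      let cur : Int := ins.length
      if cur == 0 then []  -- Python: raise ValueError("No kid examples found"); excluded by Pre_
      else
        let p := expandLoop cur target_size ins outs
        [("instruction", PySem.List.slice p.1 none (some target_size)),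
         ("response",   PySem.List.slice p.2 none (some target_size))]
  | _, _ => []  -- Python: KeyError; excluded by Pre_

-- ===== PORT B =====
def expand_dataset_alt (unified : List (String × List String)) (target_size : Int) : List (String × List String) :=
  match List.lookup "instruction" unified with
  | none => []  -- Python: KeyError; excluded by Pre_
  | some ins =>
    match List.lookup "response" unified with
    | none => []  -- Python: KeyError; excluded by Pre_
    | some outs =>
      let cur : Int := ins.length
      if cur == 0 then []  -- raise ValueError; excluded by Pre_
      else
        -- ins.extend([ins[i % cur] for i in range(cur, target_size)]) — i % cur is in range for ins,
        -- and for outs under Pre_ (equal lengths), so pyGetD is exact here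
        let ins' := if target_size > cur then
            ins ++ (PySem.List.pyRange cur target_size 1).map
              (fun i => PySem.List.pyGetD ins (PySem.Int.mod i cur) "")
          else ins
        let outs' := if target_size > cur then
            outs ++ (PySem.List.pyRange cur target_size 1).map
              (fun i => PySem.List.pyGetD outs (PySem.Int.mod i cur) "")
          else outs
        [("instruction", PySem.List.slice ins' none (some target_size)),
         ("response",   PySem.List.slice outs' none (some target_size))]

-- ===== PRECONDITION & SPEC =====
-- Pre_ excludes inputs where A raises (missing "instruction"/"response" key → KeyError, empty
-- instruction list → ValueError) and, stated narrowing, malformed datasets whose instruction and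
-- response lists have DIFFERENT lengths: A still returns there, but its loop (driven by the
-- instruction length alone) pads the response list to an accidental, non-cyclic value, while B's
-- natural tiling indexes out of range.
def Pre_expand_dataset (unified : List (String × List String)) (target_size : Int) : Prop :=
  (List.lookup "instruction" unified).isSome = true ∧
  (List.lookup "response" unified).isSome = true ∧
  ((List.lookup "instruction" unified).getD []) ≠ [] ∧
  ((List.lookup "instruction" unified).getD []).length = ((List.lookup "response" unified).getD []).length
instance (unified : List (String × List String)) (target_size : Int) : Decidable (Pre_expand_dataset unified target_size) := by unfold Pre_expand_dataset; infer_instance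

def pvWitness_expand_dataset : (List (String × List String)) × Int :=
  ([("instruction", ["a", "b"]), ("response", ["x", "y"])], 5)

def Spec_expand_dataset (unified : List (String × List String)) (target_size : Int) (out : List (String × List String)) : Prop := out = expand_dataset_alt unified target_size
instance (unified : List (String × List String)) (target_size : Int) (out : List (String × List String)) : Decidable (Spec_expand_dataset unified target_size out) := by unfold Spec_expand_dataset; infer_instance

-- ===== CLAIM (what is proved, stated in full; the proofs are below) =====
def Claim_equal_expand_dataset : Prop := ∀ (unified : List (String × List String)) (target_size : Int), Dom_expand_dataset unified target_size → Pre_expand_dataset unified target_size → Spec_expand_dataset unified target_size (expand_dataset unified target_size)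

-- ===== LEMMAS AND PROOFS =====\n
-- the loop invariant: both lists stay cyclic repetitions of their originals b, b' (of equal length),
-- keep equal lengths, and the loop exits with length ≥ target
theorem expandLoop_spec (b b' : List String) (target : Int) (hb : b ≠ [])
    (ins outs : List String)
    (hlen2 : outs.length = ins.length)
    (hge : b.length ≤ ins.length)
    (hmul : b.length ∣ ins.length ∨ target ≤ (ins.length : Int))
    (hcy : ∀ i, i < ins.length → ins[i]? = b[i % b.length]?)
    (hcy' : ∀ i, i < outs.length → outs[i]? = b'[i % b.length]?) :
    target ≤ ((expandLoop (b.length : Int) target ins outs).1.length : Int) ∧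
    (expandLoop (b.length : Int) target ins outs).2.length = (expandLoop (b.length : Int) target ins outs).1.length ∧
    (∀ i, i < (expandLoop (b.length : Int) target ins outs).1.length →
        (expandLoop (b.length : Int) target ins outs).1[i]? = b[i % b.length]?) ∧
    (∀ i, i < (expandLoop (b.length : Int) target ins outs).2.length →
        (expandLoop (b.length : Int) target ins outs).2[i]? = b'[i % b.length]?) := by
  have hc : 0 < b.length := List.length_pos_iff.mpr hb
  revert hlen2 hge hmul hcy hcy'
  induction ins, outs using expandLoop.induct (b.length : Int) target with
  | case1 ins outs h ih =>
    intro hlen2 hge hmul hcy hcy'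
    obtain ⟨hlt, -, hpos⟩ := h
    have hdvd : b.length ∣ ins.length := by
      rcases hmul with h' | h'
      · exact h'
      · omega
    -- the chunk appended this round
    set k : Int := min (b.length : Int) (target - (ins.length : Int)) with hkdef
    have hk1 : 1 ≤ k := by omega
    have hk2 : k ≤ (b.length : Int) := by omega
    have hsl : PySem.List.slice ins none (some k) = ins.take k.toNat :=
      PySem.List.slice_to ins (by omega)
    have hsl' : PySem.List.slice outs none (some (min (b.length : Int) (target - (outs.length : Int))))
        = outs.take k.toNat := by
      rw [hlen2, PySem.List.slice_to outs (by omega)]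
    have hknle : k.toNat ≤ ins.length := by omega
    have hlt1 : (ins ++ ins.take k.toNat).length = ins.length + k.toNat := by
      simp [List.length_take]; omega
    have hlt2 : (outs ++ outs.take k.toNat).length = ins.length + k.toNat := by
      simp [List.length_take]; omega
    have key : ∀ (xs : List String) (bb : List String),
        xs.length = ins.length → (∀ i, i < xs.length → xs[i]? = bb[i % b.length]?) →
        ∀ i, i < (xs ++ xs.take k.toNat).length → (xs ++ xs.take k.toNat)[i]? = bb[i % b.length]? := by
      intro xs bb hxl hx i hi
      rcases Nat.lt_or_ge i xs.length with hil | hir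
      · rw [List.getElem?_append_left hil]; exact hx i hil
      · have hjk : i - xs.length < k.toNat := by
          simp [List.length_take] at hi; omega
        rw [List.getElem?_append_right hir, List.getElem?_take, if_pos hjk]
        rw [hx (i - xs.length) (by omega)]
        obtain ⟨m, hm⟩ := hdvd
        have him : i = b.length * m + (i - xs.length) := by omega
        have hmod : i % b.length = (i - xs.length) % b.length := by
          conv_lhs => rw [him]
          exact Nat.mul_add_mod _ _ _
        rw [hmod]
    rw [expandLoop, dif_pos ⟨hlt, by exact_mod_cast hc, hpos⟩]
    refine ih ?_ ?_ ?_ ?_ ?_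
    · rw [hsl, hsl', hlt1, hlt2]
    · rw [hsl, hlt1]; omega
    · rw [hsl, hlt1]
      rcases eq_or_lt_of_le hk2 with he | hlt'
      · left
        have hkb : k.toNat = b.length := by omega
        rw [hkb]
        exact Dvd.dvd.add hdvd ⟨1, by ring⟩
      · right
        have : k = target - (ins.length : Int) := by omega
        omega
    · rw [hsl]; exact key ins b rfl hcy
    · rw [hsl']; exact key outs b' hlen2 hcy'
  | case2 ins outs h =>
    intro hlen2 hge hmul hcy hcy'
    rw [expandLoop, dif_neg h]
    have hexit : target ≤ (ins.length : Int) := by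
      by_contra hcon
      exact h ⟨by omega, by exact_mod_cast hc, by omega⟩
    exact ⟨hexit, hlen2, hcy, hcy'⟩

-- the element of B's tiled list: position i (i < t) holds xs[i % len xs]
theorem alt_elem (xs : List String) (c : Nat) (t : Int) (hx : xs ≠ []) (hcx : xs.length = c)
    (hlt : (xs.length : Int) < t) (i : Nat) (hi : i < t.toNat) :
    (xs ++ (PySem.List.pyRange (c : Int) t 1).map
        (fun j => PySem.List.pyGetD xs (PySem.Int.mod j (c : Int)) ""))[i]? =
      xs[i % c]? := by
  subst hcx
  have hc : 0 < xs.length := List.length_pos_iff.mpr hx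
  rcases Nat.lt_or_ge i xs.length with hil | hir
  · rw [List.getElem?_append_left hil, Nat.mod_eq_of_lt hil]
  · rw [List.getElem?_append_right hir, List.getElem?_map]
    have hk : i - xs.length < (t - (xs.length : Int)).toNat := by omega
    rw [PySem.List.getElem?_pyRange_one, if_pos hk]
    have hcast : (xs.length : Int) + ((i - xs.length : Nat) : Int) = (i : Int) := by
      omega
    simp only [Option.map_some, hcast]
    have hmod : PySem.Int.mod (i : Int) (xs.length : Int) = ((i % xs.length : Nat) : Int) :=
      PySem.Int.mod_natCast i xs.length
    rw [hmod, PySem.List.pyGetD_natCast]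
    have hml : i % xs.length < xs.length := Nat.mod_lt _ hc
    rw [List.getD_eq_getElem?_getD, List.getElem?_eq_getElem hml]
    simp

-- ===== VERDICT (by name: the statement is the Claim_ definition above) =====
theorem expand_dataset_spec : Claim_equal_expand_dataset := by
  unfold Claim_equal_expand_dataset Spec_expand_dataset
  intro unified t _ hpre
  obtain ⟨h1, h2, hne, hL⟩ := hpre
  rcases hi : List.lookup "instruction" unified with - | ins
  · rw [hi] at h1; simp at h1
  rcases ho : List.lookup "response" unified with - | outs
  · rw [ho] at h2; simp at h2
  rw [hi] at hne hL
  rw [ho] at hL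
  simp only [Option.getD_some] at hne hL
  have hc : 0 < ins.length := List.length_pos_iff.mpr hne
  have hbeq : ((ins.length : Int) == 0) = false := by
    simp; omega
  unfold expand_dataset expand_dataset_alt
  rw [hi, ho]
  simp only [hbeq, Bool.false_eq_true, if_false]
  rcases lt_or_ge (ins.length : Int) t with hgt | hle
  case inr =>
    -- loop body never runs; B's tiling branch is not taken either
    have hp : expandLoop (ins.length : Int) t ins outs = (ins, outs) := by
      rw [expandLoop, dif_neg (by omega)]
    rw [hp, if_neg (by omega), if_neg (by omega)]
  case inl =>
    -- loop runs; both sides are the cyclic tiling cut at t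
    have hspec := expandLoop_spec ins outs t hne ins outs hL.symm le_rfl (Or.inl dvd_rfl)
      (fun i hi' => by rw [Nat.mod_eq_of_lt hi'])
      (fun i hi' => by rw [Nat.mod_eq_of_lt (by omega)])
    obtain ⟨hplen, hpeq, hp1, hp2⟩ := hspec
    rw [if_pos (by omega), if_pos (by omega)]
    have ht0 : (0:Int) ≤ t := by omega
    have heq1 : PySem.List.slice (expandLoop (ins.length : Int) t ins outs).1 none (some t)
        = PySem.List.slice (ins ++ (PySem.List.pyRange (ins.length : Int) t 1).map
            (fun j => PySem.List.pyGetD ins (PySem.Int.mod j (ins.length : Int)) "")) none (some t) := by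
      rw [PySem.List.slice_to _ ht0, PySem.List.slice_to _ ht0]
      apply List.ext_getElem?
      intro n
      rcases Nat.lt_or_ge n t.toNat with hn | hn
      · rw [List.getElem?_take, if_pos hn, List.getElem?_take, if_pos hn]
        rw [hp1 n (by omega), alt_elem ins ins.length t hne rfl hgt n hn]
      · rw [List.getElem?_take, if_neg (by omega), List.getElem?_take, if_neg (by omega)]
    have houts : outs ≠ [] := by
      intro hcon
      rw [hcon] at hL
      simp only [List.length_nil] at hL
      omega
    have hgt' : (outs.length : Int) < t := by omega
    have heq2 : PySem.List.slice (expandLoop (ins.length : Int) t ins outs).2 none (some t)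
        = PySem.List.slice (outs ++ (PySem.List.pyRange (ins.length : Int) t 1).map
            (fun j => PySem.List.pyGetD outs (PySem.Int.mod j (ins.length : Int)) "")) none (some t) := by
      rw [PySem.List.slice_to _ ht0, PySem.List.slice_to _ ht0]
      apply List.ext_getElem?
      intro n
      rcases Nat.lt_or_ge n t.toNat with hn | hn
      · rw [List.getElem?_take, if_pos hn, List.getElem?_take, if_pos hn]
        rw [hp2 n (by omega), alt_elem outs ins.length t houts hL.symm hgt' n hn]
      · rw [List.getElem?_take, if_neg (by omega), List.getElem?_take, if_neg (by omega)]
    rw [heq1, heq2]
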